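-- pv_equiv track=rewrite | github.com/RenzoGior/uba.estudios | Algoritmo1/ejercicios/ejercicios_6/ejercicio_6_3.py | insertar_caracter_3
-- ===== SOURCE A (Python) =====
-- def insertar_caracter_3 (s: str, n: int) -> str:
--     cadena = ""
--     numero = 0
--     contador = 0
--     for i in s:
--         numero += 1
--         if numero % 3 == 0 and contador < n:
--             cadena += i
--             cadena += "."
--             contador += 1
--         else:
--             cadena += i
--     return cadena
-- ===== SOURCE B (Python) =====
-- def insertar_caracter_3(s: str, n: int) -> str:
--     parts = []
--     contador = 0
--     for i in range(0, len(s), 3):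
--         chunk = s[i:i+3]
--         if len(chunk) == 3 and contador < n:
--             parts.append(chunk + ".")
--             contador += 1
--         else:
--             parts.append(chunk)
--     return "".join(parts)
-- ===== Notes on version B (the rewrite author's own statement) =====
-- stated objective: alternative
-- what changed: Replaces A's char-by-char loop with a modulo-3 position counter by a traversal in slices of 3 characters that appends a dot to each full chunk while the dot counter is below n.
import Mathlib
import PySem

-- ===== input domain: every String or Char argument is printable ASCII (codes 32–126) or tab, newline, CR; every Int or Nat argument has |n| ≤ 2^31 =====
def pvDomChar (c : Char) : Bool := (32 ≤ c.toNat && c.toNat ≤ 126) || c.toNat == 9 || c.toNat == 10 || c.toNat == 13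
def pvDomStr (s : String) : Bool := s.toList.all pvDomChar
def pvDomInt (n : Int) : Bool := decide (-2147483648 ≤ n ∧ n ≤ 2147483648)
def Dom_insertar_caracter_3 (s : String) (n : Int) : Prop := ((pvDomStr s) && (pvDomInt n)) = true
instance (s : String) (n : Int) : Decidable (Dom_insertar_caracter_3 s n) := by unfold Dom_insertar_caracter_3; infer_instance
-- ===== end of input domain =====

-- B replaces A's char-by-char modulo-3 counter with a chunk-of-3 slice traversal (objective: alternative decomposition, same cost).

-- ===== PORT A =====
-- A's for-loop over the characters, state (cadena, numero, contador); the string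
-- accumulator is carried as a List Char and rendered with String.mk at the end (exact).
def insertarALoop (n : Int) : List Char → List Char → Int → Int → List Char
  | [], cadena, _, _ => cadena
  | i :: rest, cadena, numero, contador =>
    let numero := numero + 1
    if numero % 3 = 0 ∧ contador < n then
      insertarALoop n rest (cadena ++ [i, '.']) numero (contador + 1)
    else
      insertarALoop n rest (cadena ++ [i]) numero contador

def insertar_caracter_3 (s : String) (n : Int) : String :=
  String.mk (insertarALoop n s.toList [] 0 0)

-- ===== PORT B =====
-- Source B's loop over range(0, len(s), 3): each iteration handles the slice s[i:i+3]
-- (here: the head plus take 2 of the remainder, exact for these in-range slices),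
-- appends it (with '.' if it is a full chunk and contador < n) to the parts list.
def insertarBChunks (n : Int) : List Char → Int → List (List Char)
  | [], _ => []
  | c :: cs, contador =>
    let chunk := c :: cs.take 2
    if chunk.length = 3 ∧ contador < n then
      (chunk ++ ['.']) :: insertarBChunks n (cs.drop 2) (contador + 1)
    else
      chunk :: insertarBChunks n (cs.drop 2) contador
  termination_by cs => cs.length
  decreasing_by all_goals simp [List.length_drop]

def insertar_caracter_3_alt (s : String) (n : Int) : String :=
  String.mk (insertarBChunks n s.toList 0).flatten

-- ===== PRECONDITION & SPEC =====
def Spec_insertar_caracter_3 (s : String) (n : Int) (out : String) : Prop := out = insertar_caracter_3_alt s n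
instance (s : String) (n : Int) (out : String) : Decidable (Spec_insertar_caracter_3 s n out) := by unfold Spec_insertar_caracter_3; infer_instance

-- ===== CLAIM (what is proved, stated in full; the proofs are below) =====
def Claim_equal_insertar_caracter_3 : Prop := ∀ (s : String) (n : Int), Dom_insertar_caracter_3 s n → Spec_insertar_caracter_3 s n (insertar_caracter_3 s n)

-- ===== LEMMAS AND PROOFS =====

-- At a chunk boundary (numero = 3*k) the remaining A-loop output is the flatten of B's chunks.
lemma insertar_loop_eq_chunks (n : Int) :
    ∀ (m : Nat) (cs : List Char), cs.length ≤ m →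
      ∀ (cad : List Char) (k contador : Int),
        insertarALoop n cs cad (3 * k) contador =
          cad ++ (insertarBChunks n cs contador).flatten := by
  intro m
  induction m with
  | zero =>
    intro cs h cad k contador
    interval_cases h' : cs.length
    · simp at h' ; subst h' ; simp [insertarALoop, insertarBChunks]
  | succ m ih =>
    intro cs h cad k contador
    match cs with
    | [] => simp [insertarALoop, insertarBChunks]
    | [c] =>
      simp only [insertarALoop, insertarBChunks]
      rw [if_neg (by omega), if_neg (by simp)]
      simp [insertarBChunks]
    | [c, d] =>
      simp only [insertarALoop, insertarBChunks]
      rw [if_neg (by omega), if_neg (by omega), if_neg (by simp)]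
      simp [insertarBChunks]
    | c :: d :: e :: rest =>
      have hr : rest.length ≤ m := by simp at h; omega
      have h3 : 3 * k + 1 + 1 + 1 = 3 * (k + 1) := by ring
      simp only [insertarALoop, insertarBChunks]
      rw [if_neg (by omega), if_neg (by omega), h3]
      by_cases hc : contador < n
      · rw [if_pos ⟨by omega, hc⟩, if_pos (by simp [hc])]
        rw [ih rest hr _ (k + 1) (contador + 1)]
        simp
      · rw [if_neg (by omega), if_neg (by simp [hc])]
        rw [ih rest hr _ (k + 1) contador]
        simp

-- ===== VERDICT (by name: the statement is the Claim_ definition above) =====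
theorem insertar_caracter_3_spec : Claim_equal_insertar_caracter_3 := by
  intro s n _
  unfold Spec_insertar_caracter_3 insertar_caracter_3 insertar_caracter_3_alt
  have := insertar_loop_eq_chunks n s.toList.length s.toList le_rfl [] 0 0
  simp at this
  rw [this]
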